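-- pv_equiv track=rewrite | github.com/WiseRowlet/advent_of_code | 2024/14_code.py | check_robots
-- ===== SOURCE A (Python) =====
-- def check_robots(robots):
--     robot_positions = set(robot["position"] for robot in robots)
--     for robot in robot_positions:
--         robot_filled = False
--         for nx, ny in [
--             (robot[0] - 1, robot[1]),
--             (robot[0] + 1, robot[1]),
--             (robot[0], robot[1] - 1),
--             (robot[0], robot[1] + 1),
--             (robot[0] - 1, robot[1] - 1),
--             (robot[0] + 1, robot[1] + 1),
--             (robot[0] - 1, robot[1] + 1),
--             (robot[0] + 1, robot[1] - 1),
--         ]: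
--             if (nx, ny) not in robot_positions:
--                 robot_filled = False
--                 break
--             else:
--                 robot_filled = True
--         if robot_filled:
--             return True
--     return False
-- ===== SOURCE B (Python) =====
-- OFFSETS = ((-1, 0), (1, 0), (0, -1), (0, 1), (-1, -1), (1, 1), (-1, 1), (1, -1))
--
--
-- def check_robots(robots):
--     positions = set(robot["position"] for robot in robots)
--     candidates = set(positions)
--     for dx, dy in OFFSETS:
--         candidates = {p for p in candidates if (p[0] + dx, p[1] + dy) in positions}
--     return bool(candidates)
-- ===== Notes on version B (the rewrite author's own statement) =====
-- stated objective: alternative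
-- what changed: Instead of scanning each robot's 8 neighbors with an inner break-loop, B iterates over the 8 fixed offsets and narrows a shrinking candidate set by one filtering pass per offset, returning whether any candidate survives.
import Mathlib
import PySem

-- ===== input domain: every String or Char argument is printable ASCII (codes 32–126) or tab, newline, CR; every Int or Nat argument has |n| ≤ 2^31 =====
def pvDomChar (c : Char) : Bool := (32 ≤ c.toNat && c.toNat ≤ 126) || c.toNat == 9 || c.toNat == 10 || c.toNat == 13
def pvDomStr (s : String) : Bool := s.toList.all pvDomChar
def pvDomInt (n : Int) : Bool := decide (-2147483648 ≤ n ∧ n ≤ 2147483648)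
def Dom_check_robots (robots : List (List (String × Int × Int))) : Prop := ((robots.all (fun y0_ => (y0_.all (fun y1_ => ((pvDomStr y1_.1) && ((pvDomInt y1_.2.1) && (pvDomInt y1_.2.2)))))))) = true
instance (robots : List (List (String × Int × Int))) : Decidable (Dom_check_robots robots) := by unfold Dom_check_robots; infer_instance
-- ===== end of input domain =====

-- B replaces A's per-robot scan of the 8 neighbours by eight filtering passes over a
-- shrinking candidate set, one per fixed offset (alternative decomposition, same cost).

-- ===== PORT A =====
-- robot["position"]: Python dict lookup (duplicate keys: last value wins, as Dict.ofList).
-- Total getD form with a dummy default; exact under Pre_ (the key is present in every robot).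
def pvPos (r : List (String × Int × Int)) : Int × Int :=
  (PySem.Dict.ofList r).getD "position" (0, 0)

-- the literal 8-element neighbour list of A
def pvNbrs (p : Int × Int) : List (Int × Int) :=
  [(p.1 - 1, p.2), (p.1 + 1, p.2), (p.1, p.2 - 1), (p.1, p.2 + 1),
   (p.1 - 1, p.2 - 1), (p.1 + 1, p.2 + 1), (p.1 - 1, p.2 + 1), (p.1 + 1, p.2 - 1)]

-- inner for-loop: robot_filled accumulator, break on a missing neighbour
def pvInner (positions : PySem.Set (Int × Int)) : List (Int × Int) → Bool → Bool
  | [], filled => filled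
  | n :: rest, _ =>
      if !(PySem.Set.contains positions n) then false else pvInner positions rest true

-- outer for-loop over the position set: return True on the first filled robot
def pvOuter (positions : PySem.Set (Int × Int)) : List (Int × Int) → Bool
  | [] => false
  | p :: rest => if pvInner positions (pvNbrs p) false then true else pvOuter positions rest

def check_robots (robots : List (List (String × Int × Int))) : Bool :=
  let positions := PySem.Set.ofList (robots.map pvPos)
  pvOuter positions positions

-- ===== PORT B =====
def pvOffsets : List (Int × Int) :=
  [(-1, 0), (1, 0), (0, -1), (0, 1), (-1, -1), (1, 1), (-1, 1), (1, -1)]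

def check_robots_alt (robots : List (List (String × Int × Int))) : Bool :=
  let positions := PySem.Set.ofList (robots.map pvPos)
  let candidates := pvOffsets.foldl
    (fun c d => c.filter (fun p => PySem.Set.contains positions (p.1 + d.1, p.2 + d.2)))
    positions
  !candidates.isEmpty

-- ===== PRECONDITION & SPEC =====
-- Pre_ excludes exactly the inputs where A raises KeyError: a robot dict without a "position" key.
def Pre_check_robots (robots : List (List (String × Int × Int))) : Prop :=
  (robots.all (fun r => r.any (fun t => t.1 == "position"))) = true
instance (robots : List (List (String × Int × Int))) : Decidable (Pre_check_robots robots) := by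
  unfold Pre_check_robots; infer_instance

def pvWitness_check_robots : (List (List (String × Int × Int))) := [[("position", 0, 0)]]

def Spec_check_robots (robots : List (List (String × Int × Int))) (out : Bool) : Prop := out = check_robots_alt robots
instance (robots : List (List (String × Int × Int))) (out : Bool) : Decidable (Spec_check_robots robots out) := by unfold Spec_check_robots; infer_instance

-- ===== CLAIM (what is proved, stated in full; the proofs are below) =====
def Claim_equal_check_robots : Prop := ∀ (robots : List (List (String × Int × Int))), Dom_check_robots robots → Pre_check_robots robots → Spec_check_robots robots (check_robots robots)

-- ===== LEMMAS AND PROOFS =====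
theorem pvInner_eq (s : PySem.Set (Int × Int)) (rest : List (Int × Int)) (n : Int × Int)
    (b : Bool) :
    pvInner s (n :: rest) b = (n :: rest).all (fun x => PySem.Set.contains s x) := by
  induction rest generalizing n b with
  | nil => cases PySem.Set.contains s n <;> simp [pvInner]
  | cons m rest ih =>
      rw [pvInner]
      cases h : PySem.Set.contains s n <;>
        simp only [List.all_cons, h, ih m true, Bool.not_false, Bool.not_true, Bool.false_and,
          Bool.true_and, reduceIte] <;> try rfl

theorem pvInner_nbrs (s : PySem.Set (Int × Int)) (p : Int × Int) :
    pvInner s (pvNbrs p) false = (pvNbrs p).all (fun x => PySem.Set.contains s x) := by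
  simp only [pvNbrs]
  exact pvInner_eq s _ _ false

theorem pvOuter_eq (s : PySem.Set (Int × Int)) (l : List (Int × Int)) :
    pvOuter s l = l.any (fun p => (pvNbrs p).all (fun x => PySem.Set.contains s x)) := by
  induction l with
  | nil => simp [pvOuter]
  | cons p rest ih =>
      rw [pvOuter, pvInner_nbrs, List.any_cons, ih]
      generalize (pvNbrs p).all (fun x => PySem.Set.contains s x) = X
      generalize List.any rest (fun p => (pvNbrs p).all fun x => PySem.Set.contains s x) = Y
      cases X <;> simp

theorem foldl_filter_eq {α β : Type} (f : β → α → Bool) (offs : List β) (l : List α) :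
    offs.foldl (fun c d => c.filter (f d)) l
      = l.filter (fun p => offs.all (fun d => f d p)) := by
  induction offs generalizing l with
  | nil => simp
  | cons d offs ih =>
      simp only [List.foldl_cons, ih, List.filter_filter, List.all_cons]
      exact List.filter_congr (fun p _ => by cases f d p <;> simp)

theorem not_isEmpty_filter {α : Type} (p : α → Bool) (l : List α) :
    (!(l.filter p).isEmpty) = l.any p := by
  induction l with
  | nil => simp
  | cons a l ih => cases h : p a <;> simp [h, ih]

theorem nbrs_all_eq (s : PySem.Set (Int × Int)) (p : Int × Int) :
    (pvNbrs p).all (fun x => PySem.Set.contains s x)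
      = pvOffsets.all (fun d => PySem.Set.contains s (p.1 + d.1, p.2 + d.2)) := by
  simp only [pvNbrs, pvOffsets, List.all_cons, List.all_nil, Int.sub_eq_add_neg, Int.add_zero]

-- ===== VERDICT (by name: the statement is the Claim_ definition above) =====
theorem check_robots_spec : Claim_equal_check_robots := by
  intro robots _ _
  show check_robots robots = check_robots_alt robots
  simp only [check_robots, check_robots_alt]
  rw [pvOuter_eq, foldl_filter_eq, not_isEmpty_filter]
  exact List.any_congr rfl (fun p => nbrs_all_eq _ p)
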